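-- pv_equiv track=rewrite | github.com/GrayboxTech/weightslab_ui | weights_lab.py | convert_checklist_to_df_head
-- ===== SOURCE A (Python) =====
-- def convert_checklist_to_df_head(checklist_values):
--     heading = []
--     for checklist_value in checklist_values:
--         if checklist_value == 'neuron_id':
--             heading.append("neuron_id")
--         if checklist_value == 'neuron_age':
--             heading.append("Age")
--         if checklist_value == 'trigger_rate_train':
--             heading.append("RTrn")
--         if checklist_value == 'trigger_rate_eval':
--             heading.append("REval")
--         if checklist_value == 'abs_diff':
--             heading.append("ADiff")
--         if checklist_value == 'rel_diff':
--             heading.append("RDiff")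
--         if checklist_value == 'weight_diff':
--             heading.append("WDiff")
--         if checklist_value == 'bias_diff':
--             heading.append("BDiff")
--     for checklist_value in checklist_values:
--         if checklist_value == 'frozen':
--             heading.append("Frzn")
--         if checklist_value == 'status':
--             heading.append("Status")
--
--     return heading
-- ===== SOURCE B (Python) =====
-- _MAIN = {
--     'neuron_id': 'neuron_id',
--     'neuron_age': 'Age',
--     'trigger_rate_train': 'RTrn',
--     'trigger_rate_eval': 'REval',
--     'abs_diff': 'ADiff',
--     'rel_diff': 'RDiff',
--     'weight_diff': 'WDiff',
--     'bias_diff': 'BDiff',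
-- }
-- _TAIL = {
--     'frozen': 'Frzn',
--     'status': 'Status',
-- }
--
-- def convert_checklist_to_df_head(checklist_values):
--     main_list = []
--     tail_list = []
--     for v in checklist_values:
--         if v in _MAIN:
--             main_list.append(_MAIN[v])
--         elif v in _TAIL:
--             tail_list.append(_TAIL[v])
--     return main_list + tail_list
-- ===== Notes on version B (the rewrite author's own statement) =====
-- stated objective: alternative
-- what changed: Replaces A's two full scans with chained per-value if-comparisons by a single partitioning pass over the input that looks each value up in two module-level dict mappings, collecting a main bucket and a tail bucket and returning their concatenation.
import Mathlib
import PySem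

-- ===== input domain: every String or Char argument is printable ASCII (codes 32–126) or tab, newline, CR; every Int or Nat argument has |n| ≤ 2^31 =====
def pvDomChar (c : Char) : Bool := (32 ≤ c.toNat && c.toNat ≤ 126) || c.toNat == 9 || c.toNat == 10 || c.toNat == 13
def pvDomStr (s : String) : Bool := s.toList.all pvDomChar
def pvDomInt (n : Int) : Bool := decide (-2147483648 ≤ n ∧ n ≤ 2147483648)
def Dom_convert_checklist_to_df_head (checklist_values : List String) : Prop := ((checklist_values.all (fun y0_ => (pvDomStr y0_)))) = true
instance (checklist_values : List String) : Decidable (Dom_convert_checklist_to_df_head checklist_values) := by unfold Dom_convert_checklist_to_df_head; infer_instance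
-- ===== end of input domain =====

-- B replaces A's two full scans over the input with one partitioning pass driven by two dict mappings (objective: alternative decomposition; same asymptotic cost).


-- ===== PORT A =====
def convert_checklist_to_df_head (checklist_values : List String) : List String :=
  let heading : List String := []
  let heading := checklist_values.foldl (fun heading checklist_value =>
    let heading := if checklist_value == "neuron_id" then heading ++ ["neuron_id"] else heading
    let heading := if checklist_value == "neuron_age" then heading ++ ["Age"] else heading
    let heading := if checklist_value == "trigger_rate_train" then heading ++ ["RTrn"] else heading
    let heading := if checklist_value == "trigger_rate_eval" then heading ++ ["REval"] else heading
    let heading := if checklist_value == "abs_diff" then heading ++ ["ADiff"] else heading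
    let heading := if checklist_value == "rel_diff" then heading ++ ["RDiff"] else heading
    let heading := if checklist_value == "weight_diff" then heading ++ ["WDiff"] else heading
    let heading := if checklist_value == "bias_diff" then heading ++ ["BDiff"] else heading
    heading) heading
  let heading := checklist_values.foldl (fun heading checklist_value =>
    let heading := if checklist_value == "frozen" then heading ++ ["Frzn"] else heading
    let heading := if checklist_value == "status" then heading ++ ["Status"] else heading
    heading) heading
  heading

-- ===== PORT B =====
-- module-level dict literals of Source B (keys are distinct, so the literal items list IS the dict)
def pvMAIN : PySem.Dict String String := PySem.Dict.mk
  [("neuron_id", "neuron_id"), ("neuron_age", "Age"), ("trigger_rate_train", "RTrn"),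
   ("trigger_rate_eval", "REval"), ("abs_diff", "ADiff"), ("rel_diff", "RDiff"),
   ("weight_diff", "WDiff"), ("bias_diff", "BDiff")]

def pvTAIL : PySem.Dict String String := PySem.Dict.mk
  [("frozen", "Frzn"), ("status", "Status")]

def convert_checklist_to_df_head_alt (checklist_values : List String) : List String :=
  let p := checklist_values.foldl (fun (acc : List String × List String) v =>
    match pvMAIN.get? v with
    | some h => (acc.1 ++ [h], acc.2)
    | none =>
      match pvTAIL.get? v with
      | some h => (acc.1, acc.2 ++ [h])
      | none => acc) ([], [])
  p.1 ++ p.2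

-- ===== PRECONDITION & SPEC =====
def Spec_convert_checklist_to_df_head (checklist_values : List String) (out : List String) : Prop := out = convert_checklist_to_df_head_alt checklist_values
instance (checklist_values : List String) (out : List String) : Decidable (Spec_convert_checklist_to_df_head checklist_values out) := by unfold Spec_convert_checklist_to_df_head; infer_instance

-- ===== CLAIM (what is proved, stated in full; the proofs are below) =====
def Claim_equal_convert_checklist_to_df_head : Prop := ∀ (checklist_values : List String), Dom_convert_checklist_to_df_head checklist_values → Spec_convert_checklist_to_df_head checklist_values (convert_checklist_to_df_head checklist_values)

-- ===== LEMMAS AND PROOFS =====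

-- per-element emission of A's first pass / B's main bucket
def pvMainF (v : String) : List String :=
  match pvMAIN.get? v with | some h => [h] | none => []

-- per-element emission of A's second pass / B's tail bucket
def pvTailF (v : String) : List String :=
  match pvMAIN.get? v with
  | some _ => []
  | none => match pvTAIL.get? v with | some h => [h] | none => []

lemma mainF_emit (acc : List String) (v : String) :
    (let heading := if v == "neuron_id" then acc ++ ["neuron_id"] else acc
     let heading := if v == "neuron_age" then heading ++ ["Age"] else heading
     let heading := if v == "trigger_rate_train" then heading ++ ["RTrn"] else heading
     let heading := if v == "trigger_rate_eval" then heading ++ ["REval"] else heading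
     let heading := if v == "abs_diff" then heading ++ ["ADiff"] else heading
     let heading := if v == "rel_diff" then heading ++ ["RDiff"] else heading
     let heading := if v == "weight_diff" then heading ++ ["WDiff"] else heading
     let heading := if v == "bias_diff" then heading ++ ["BDiff"] else heading
     heading) = acc ++ pvMainF v := by
  by_cases h1 : v = "neuron_id"; · subst h1; rw [show pvMainF "neuron_id" = ["neuron_id"] from rfl]; simp
  by_cases h2 : v = "neuron_age"; · subst h2; rw [show pvMainF "neuron_age" = ["Age"] from rfl]; simp
  by_cases h3 : v = "trigger_rate_train"; · subst h3; rw [show pvMainF "trigger_rate_train" = ["RTrn"] from rfl]; simp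
  by_cases h4 : v = "trigger_rate_eval"; · subst h4; rw [show pvMainF "trigger_rate_eval" = ["REval"] from rfl]; simp
  by_cases h5 : v = "abs_diff"; · subst h5; rw [show pvMainF "abs_diff" = ["ADiff"] from rfl]; simp
  by_cases h6 : v = "rel_diff"; · subst h6; rw [show pvMainF "rel_diff" = ["RDiff"] from rfl]; simp
  by_cases h7 : v = "weight_diff"; · subst h7; rw [show pvMainF "weight_diff" = ["WDiff"] from rfl]; simp
  by_cases h8 : v = "bias_diff"; · subst h8; rw [show pvMainF "bias_diff" = ["BDiff"] from rfl]; simp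
  simp [pvMainF, pvMAIN, PySem.Dict.get?,
        h1, h2, h3, h4, h5, h6, h7, h8,
        Ne.symm h1, Ne.symm h2, Ne.symm h3, Ne.symm h4, Ne.symm h5, Ne.symm h6, Ne.symm h7, Ne.symm h8]

lemma tailF_emit (acc : List String) (v : String) :
    (let heading := if v == "frozen" then acc ++ ["Frzn"] else acc
     let heading := if v == "status" then heading ++ ["Status"] else heading
     heading) = acc ++ pvTailF v := by
  by_cases h1 : v = "frozen"; · subst h1; rw [show pvTailF "frozen" = ["Frzn"] from rfl]; simp
  by_cases h2 : v = "status"; · subst h2; rw [show pvTailF "status" = ["Status"] from rfl]; simp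
  have hl : (let heading := if v == "frozen" then acc ++ ["Frzn"] else acc
             let heading := if v == "status" then heading ++ ["Status"] else heading
             heading) = acc := by simp [h1, h2]
  rw [hl]
  have ht : pvTailF v = [] := by
    unfold pvTailF
    rcases pvMAIN.get? v with _ | w
    · simp [pvTAIL, PySem.Dict.get?, Ne.symm h1, Ne.symm h2]
    · rfl
  simp [ht]

lemma a_first_flatMap (xs : List String) (acc : List String) :
    xs.foldl (fun heading checklist_value =>
      let heading := if checklist_value == "neuron_id" then heading ++ ["neuron_id"] else heading
      let heading := if checklist_value == "neuron_age" then heading ++ ["Age"] else heading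
      let heading := if checklist_value == "trigger_rate_train" then heading ++ ["RTrn"] else heading
      let heading := if checklist_value == "trigger_rate_eval" then heading ++ ["REval"] else heading
      let heading := if checklist_value == "abs_diff" then heading ++ ["ADiff"] else heading
      let heading := if checklist_value == "rel_diff" then heading ++ ["RDiff"] else heading
      let heading := if checklist_value == "weight_diff" then heading ++ ["WDiff"] else heading
      let heading := if checklist_value == "bias_diff" then heading ++ ["BDiff"] else heading
      heading) acc = acc ++ xs.flatMap pvMainF := by
  have hbody : (fun (heading : List String) checklist_value =>
      let heading := if checklist_value == "neuron_id" then heading ++ ["neuron_id"] else heading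
      let heading := if checklist_value == "neuron_age" then heading ++ ["Age"] else heading
      let heading := if checklist_value == "trigger_rate_train" then heading ++ ["RTrn"] else heading
      let heading := if checklist_value == "trigger_rate_eval" then heading ++ ["REval"] else heading
      let heading := if checklist_value == "abs_diff" then heading ++ ["ADiff"] else heading
      let heading := if checklist_value == "rel_diff" then heading ++ ["RDiff"] else heading
      let heading := if checklist_value == "weight_diff" then heading ++ ["WDiff"] else heading
      let heading := if checklist_value == "bias_diff" then heading ++ ["BDiff"] else heading
      heading) = (fun heading checklist_value => heading ++ pvMainF checklist_value) := by
    funext heading checklist_value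
    exact mainF_emit heading checklist_value
  rw [hbody, PySem.List.foldl_append_eq_flatMap]

lemma a_second_flatMap (xs : List String) (acc : List String) :
    xs.foldl (fun heading checklist_value =>
      let heading := if checklist_value == "frozen" then heading ++ ["Frzn"] else heading
      let heading := if checklist_value == "status" then heading ++ ["Status"] else heading
      heading) acc = acc ++ xs.flatMap pvTailF := by
  have hbody : (fun (heading : List String) checklist_value =>
      let heading := if checklist_value == "frozen" then heading ++ ["Frzn"] else heading
      let heading := if checklist_value == "status" then heading ++ ["Status"] else heading
      heading) = (fun heading checklist_value => heading ++ pvTailF checklist_value) := by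
    funext heading checklist_value
    exact tailF_emit heading checklist_value
  rw [hbody, PySem.List.foldl_append_eq_flatMap]

lemma b_flatMap (xs : List String) (m t : List String) :
    xs.foldl (fun (acc : List String × List String) v =>
      match pvMAIN.get? v with
      | some h => (acc.1 ++ [h], acc.2)
      | none =>
        match pvTAIL.get? v with
        | some h => (acc.1, acc.2 ++ [h])
        | none => acc) (m, t)
    = (m ++ xs.flatMap pvMainF, t ++ xs.flatMap pvTailF) := by
  induction xs generalizing m t with
  | nil => simp
  | cons v xs ih =>
    simp only [List.foldl_cons, List.flatMap_cons]
    rcases hm : pvMAIN.get? v with _ | h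
    · rcases ht : pvTAIL.get? v with _ | h
      · simp [hm, ht, ih, pvMainF, pvTailF]
      · simp [hm, ht, ih, pvMainF, pvTailF, List.append_assoc]
    · simp [hm, ih, pvMainF, pvTailF, List.append_assoc]

-- ===== VERDICT (by name: the statement is the Claim_ definition above) =====
theorem convert_checklist_to_df_head_spec : Claim_equal_convert_checklist_to_df_head := by
  intro xs _
  unfold Spec_convert_checklist_to_df_head convert_checklist_to_df_head convert_checklist_to_df_head_alt
  simp only [a_first_flatMap, a_second_flatMap, b_flatMap, List.nil_append]
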